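-- pv_equiv track=rewrite | github.com/softnsource/text-to-sql | app/utils/pii_vault.py | _get_or_create_key
-- ===== SOURCE A (Python) =====
-- from typing import Dict, List, Any, Optional
--
-- def _get_or_create_key(
--     entity_type: str, real_text: str, vault_map: Dict[str, str]
-- ) -> str:
--     """Return existing placeholder or mint a new one.
--
--     vault_map convention (matches original code):
--         key   = placeholder  e.g. "<PERSON_1>"
--         value = real text    e.g. "John Smith"
--     """
--     # Return placeholder if this real value is already vaulted
--     for placeholder, stored in vault_map.items():
--         if stored == real_text and placeholder.startswith(f"<{entity_type}"):
--             return placeholder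
--
--     # Mint a new placeholder
--     count = sum(1 for k in vault_map if k.startswith(f"<{entity_type}")) + 1
--     placeholder = f"<{entity_type}_{count}>"
--     vault_map[placeholder] = real_text
--     return placeholder
-- ===== SOURCE B (Python) =====
-- def _get_or_create_key(entity_type, real_text, vault_map):
--     prefix = f"<{entity_type}"
--     count = 0
--     for placeholder, stored in vault_map.items():
--         if placeholder.startswith(prefix):
--             count += 1
--             if stored == real_text:
--                 return placeholder
--     placeholder = f"<{entity_type}_{count + 1}>"
--     vault_map[placeholder] = real_text
--     return placeholder
-- ===== Notes on version B (the rewrite author's own statement) =====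
-- stated objective: faster
-- what changed: Replaces A's two sequential traversals (a search loop followed by a sum(...) counting pass) with one loop that checks the prefix once per entry, maintains a running count of prefix-matching placeholders, and returns early on a match; the mint uses the accumulated count.
import Mathlib
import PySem

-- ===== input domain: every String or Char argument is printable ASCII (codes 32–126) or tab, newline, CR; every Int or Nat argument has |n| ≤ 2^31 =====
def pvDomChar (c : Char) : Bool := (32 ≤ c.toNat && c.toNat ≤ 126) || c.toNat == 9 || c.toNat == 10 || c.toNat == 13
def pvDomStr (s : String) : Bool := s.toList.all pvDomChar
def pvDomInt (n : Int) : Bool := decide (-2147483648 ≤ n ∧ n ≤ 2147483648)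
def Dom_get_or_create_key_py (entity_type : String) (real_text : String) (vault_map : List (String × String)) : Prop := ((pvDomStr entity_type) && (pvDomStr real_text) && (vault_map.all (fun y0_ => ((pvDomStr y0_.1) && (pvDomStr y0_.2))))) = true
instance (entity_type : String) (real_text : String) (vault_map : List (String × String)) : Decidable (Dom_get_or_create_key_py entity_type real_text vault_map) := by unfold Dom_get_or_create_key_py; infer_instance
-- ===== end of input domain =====

-- B folds A's search loop and separate sum(...) counting pass into one traversal keeping a
-- running count of prefix-matching placeholders (objective: simpler, single pass).
-- Both A and B insert the minted placeholder into vault_map; equivalence proved is about the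
-- RETURN value (the mutation is identical in both Pythons).

-- ===== PORT A =====
-- the `for placeholder, stored in vault_map.items(): if … return placeholder` loop
def pvA_find (entity_type : String) (real_text : String) : List (String × String) → Option String
  | [] => none
  | (placeholder, stored) :: rest =>
      if stored == real_text && PySem.Str.startswith placeholder ("<" ++ entity_type) then
        some placeholder
      else pvA_find entity_type real_text rest

def get_or_create_key_py (entity_type : String) (real_text : String) (vault_map : List (String × String)) : String :=
  match pvA_find entity_type real_text vault_map with
  | some placeholder => placeholder
  | none =>
      -- count = sum(1 for k in vault_map if k.startswith(f"<{entity_type}")) + 1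
      let count : Int :=
        (vault_map.foldl (fun acc kv =>
          if PySem.Str.startswith kv.1 ("<" ++ entity_type) then acc + 1 else acc) 0) + 1
      "<" ++ entity_type ++ "_" ++ PySem.Int.toStr count ++ ">"

-- ===== PORT B =====
-- B's single loop: running count of prefix matches, early return on a stored == real_text hit
def pvB_go (entity_type : String) (real_text : String) : List (String × String) → Int → String
  | [], count => "<" ++ entity_type ++ "_" ++ PySem.Int.toStr (count + 1) ++ ">"
  | (placeholder, stored) :: rest, count =>
      if PySem.Str.startswith placeholder ("<" ++ entity_type) then
        if stored == real_text then placeholder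
        else pvB_go entity_type real_text rest (count + 1)
      else pvB_go entity_type real_text rest count

def get_or_create_key_py_alt (entity_type : String) (real_text : String) (vault_map : List (String × String)) : String :=
  pvB_go entity_type real_text vault_map 0

-- ===== PRECONDITION & SPEC =====
def Spec_get_or_create_key_py (entity_type : String) (real_text : String) (vault_map : List (String × String)) (out : String) : Prop := out = get_or_create_key_py_alt entity_type real_text vault_map
instance (entity_type : String) (real_text : String) (vault_map : List (String × String)) (out : String) : Decidable (Spec_get_or_create_key_py entity_type real_text vault_map out) := by unfold Spec_get_or_create_key_py; infer_instance

-- ===== CLAIM (what is proved, stated in full; the proofs are below) =====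
def Claim_equal_get_or_create_key_py : Prop := ∀ (entity_type : String) (real_text : String) (vault_map : List (String × String)), Dom_get_or_create_key_py entity_type real_text vault_map → Spec_get_or_create_key_py entity_type real_text vault_map (get_or_create_key_py entity_type real_text vault_map)

-- ===== LEMMAS AND PROOFS =====

-- ===== VERDICT (by name: the statement is the Claim_ definition above) =====
-- B's single pass, started with accumulator c, equals A's "find, else mint with fold-count"
-- where the fold also starts at c.
theorem pvB_go_eq (entity_type real_text : String) (vm : List (String × String)) :
    ∀ c : Int,
      pvB_go entity_type real_text vm c =
        match pvA_find entity_type real_text vm with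
        | some placeholder => placeholder
        | none =>
            "<" ++ entity_type ++ "_" ++
              PySem.Int.toStr
                ((vm.foldl (fun acc kv =>
                  if PySem.Str.startswith kv.1 ("<" ++ entity_type) then acc + 1 else acc) c) + 1)
              ++ ">" := by
  induction vm with
  | nil => intro c; rfl
  | cons kv rest ih =>
      intro c
      obtain ⟨placeholder, stored⟩ := kv
      simp only [pvB_go, pvA_find, List.foldl]
      by_cases hp : PySem.Chars.startswith placeholder.toList ('<' :: entity_type.toList) = true
      · by_cases hs : stored == real_text
        · simp [hp, hs]
        · simp [hp, hs, ih]
      · by_cases hs : stored == real_text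
        · simp [hp, hs, ih]
        · simp [hp, hs, ih]

theorem get_or_create_key_py_spec : Claim_equal_get_or_create_key_py := by
  intro entity_type real_text vault_map _
  unfold Spec_get_or_create_key_py get_or_create_key_py get_or_create_key_py_alt
  rw [pvB_go_eq]
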